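-- pv_equiv track=rewrite | github.com/AtlasYang/Baekjoon_PS | N14340.py | f
-- ===== SOURCE A (Python) =====
-- def f(n, k, t = 0):
-- 	if t == 0:
-- 		t = [list(range(1, n + 1)), ]
--
-- 	tp = []
-- 	h = [0 for _ in range(len(t))]
--
-- 	for j in range(len(t)):
-- 		r = t[j]
-- 		for i in range(len(r) - 1):
-- 			if r[i] + 1 == r[i + 1]:
-- 				h[j] = 1
-- 				tp.append(r[:i] + [0, 0] + r[i + 2:])
--
-- 	for i in range(len(t)):
-- 		if h[i] == 0:
-- 			tp.append(t[i])
--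
-- 	if len(tp) == len(t):
-- 		kcnt = 0
-- 		for c in tp:
-- 			if k not in c:
-- 				kcnt += 1
-- 		return len(t), kcnt
--
-- 	else:
-- 		return f(n, k, tp)
-- ===== SOURCE B (Python) =====
-- def f(n, k, t = 0):
--     # Counter-based re-implementation: rows are deduplicated into a dict of
--     # multiplicities, so identical rows are processed once per generation.
--     if t == 0:
--         cnt = {tuple(range(1, n + 1)): 1}
--     else:
--         cnt = {}
--         for row in t:
--             key = tuple(row)
--             cnt[key] = cnt.get(key, 0) + 1
--     while True:
--         new = {}
--         for row, m in cnt.items():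
--             kids = []
--             for i in range(len(row) - 1):
--                 if row[i] + 1 == row[i + 1]:
--                     kids.append(row[:i] + (0, 0) + row[i + 2:])
--             if kids:
--                 for c in kids:
--                     new[c] = new.get(c, 0) + m
--             else:
--                 new[row] = new.get(row, 0) + m
--         old_total = sum(cnt.values())
--         if sum(new.values()) == old_total:
--             kcnt = sum(m for row, m in new.items() if k not in row)
--             return old_total, kcnt
--         cnt = new
-- ===== Notes on version B (the rewrite author's own statement) =====
-- stated objective: faster
-- what changed: Replaces A's recursion over an exponentially duplicated list of rows by an iterative fixpoint over a dict mapping each distinct row to its multiplicity, so each distinct row is expanded once per generation instead of once per copy.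
import Mathlib
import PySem

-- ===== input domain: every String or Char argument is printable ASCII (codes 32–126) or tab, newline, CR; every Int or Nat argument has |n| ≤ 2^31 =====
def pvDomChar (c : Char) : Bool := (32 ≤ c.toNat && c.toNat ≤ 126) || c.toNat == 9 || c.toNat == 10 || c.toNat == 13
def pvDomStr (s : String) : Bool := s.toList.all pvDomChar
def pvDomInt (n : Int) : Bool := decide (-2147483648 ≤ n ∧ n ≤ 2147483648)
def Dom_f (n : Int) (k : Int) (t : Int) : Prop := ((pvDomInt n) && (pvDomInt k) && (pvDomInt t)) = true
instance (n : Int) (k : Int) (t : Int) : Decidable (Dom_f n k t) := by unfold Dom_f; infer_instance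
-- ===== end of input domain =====

-- B replaces A's recursion over an exponentially duplicated list of rows by an iterative
-- fixpoint over a dict of row multiplicities (same return value by Claim_equal_f).

-- ===== PORT A =====

-- inner loop 'for i in range(len(r)-1): if r[i]+1 == r[i+1]: …append(r[:i]+[0,0]+r[i+2:])'
-- (both Pythons build the child rows of a row with this exact loop, so it is a shared helper;
--  the indices i and i+1 are always in range, so pyGetD's default is never used)
def childRows (r : List Int) : List (List Int) :=
  (PySem.List.pyRange 0 ((r.length : Int) - 1) 1).foldl
    (fun acc i =>
      if PySem.List.pyGetD r i 0 + 1 = PySem.List.pyGetD r (i + 1) 0 then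
        acc ++ [PySem.List.slice r none (some i) ++ [0, 0] ++ PySem.List.slice r (some (i + 2)) none]
      else acc) []

-- the recursive body of A, on the list t of rows; fuel bounds the recursion depth
-- (n.toNat + 2 generations always suffice: each one strictly lowers the maximal number of
-- adjacent pairs of a row, which starts below n); h[j] == 0 in A exactly when row j
-- appended no child, ported as the test 'childRows r = []'.
def fGo (k : Int) : Nat → List (List Int) → Int × Int
  | 0, _ => (0, 0)
  | fuel + 1, t =>
    let tp1 := t.foldl (fun tp r => tp ++ childRows r) []
    let tp := t.foldl (fun tp r => if childRows r = [] then tp ++ [r] else tp) tp1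
    if tp.length = t.length then
      ((t.length : Int), tp.foldl (fun kc c => if c.contains k then kc else kc + 1) (0 : Int))
    else fGo k fuel tp

def f (n : Int) (k : Int) (t : Int) : Int × Int :=
  if t = 0 then fGo k (n.toNat + 2) [PySem.List.pyRange 1 (n + 1) 1]
  else (0, 0)  -- Python A raises TypeError here (len() of an int); excluded by Pre_f

-- ===== PORT B =====

-- one generation: fold the multiplicity dict into the next one ('for row, m in cnt.items(): …')
def stepB (cnt : PySem.Dict (List Int) Nat) : PySem.Dict (List Int) Nat :=
  cnt.items.foldl
    (fun nw p =>
      let kids := childRows p.1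
      if kids = [] then nw.insert p.1 (nw.getD p.1 0 + p.2)
      else kids.foldl (fun nw c => nw.insert c (nw.getD c 0 + p.2)) nw)
    PySem.Dict.empty

-- the 'while True' loop of B (same fuel bound as A's recursion depth)
def fAltGo (k : Int) : Nat → PySem.Dict (List Int) Nat → Int × Int
  | 0, _ => (0, 0)
  | fuel + 1, cnt =>
    let nw := stepB cnt
    let oldTotal := (cnt.values.sum : Nat)
    if nw.values.sum = oldTotal then
      ((oldTotal : Int),
        ((nw.items.foldl (fun kc p => if p.1.contains k then kc else kc + p.2) (0 : Nat) : Nat) : Int))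
    else fAltGo k fuel nw

def f_alt (n : Int) (k : Int) (t : Int) : Int × Int :=
  if t = 0 then fAltGo k (n.toNat + 2) (PySem.Dict.empty.insert (PySem.List.pyRange 1 (n + 1) 1) 1)
  else (0, 0)  -- Python B raises TypeError here (iterating an int); excluded by Pre_f

-- ===== PRECONDITION & SPEC =====
-- Pre_f excludes t ≠ 0, on which Python A raises TypeError (len() of an int): t is only the
-- internal recursion parameter, whose external value is its default 0.
def Pre_f (n : Int) (k : Int) (t : Int) : Prop := t = 0
instance (n : Int) (k : Int) (t : Int) : Decidable (Pre_f n k t) := by unfold Pre_f; infer_instance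
def pvWitness_f : Int × Int × Int := (5, 3, 0)

def Spec_f (n : Int) (k : Int) (t : Int) (out : Int × Int) : Prop := out = f_alt n k t
instance (n : Int) (k : Int) (t : Int) (out : Int × Int) : Decidable (Spec_f n k t out) := by unfold Spec_f; infer_instance

-- ===== CLAIM (what is proved, stated in full; the proofs are below) =====
def Claim_equal_f : Prop := ∀ (n : Int) (k : Int) (t : Int), Dom_f n k t → Pre_f n k t → Spec_f n k t (f n k t)

-- ===== LEMMAS AND PROOFS =====

-- a row either carries over (no child) or is replaced by its children
def step1 (r : List Int) : List (List Int) := if childRows r = [] then [r] else childRows r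

-- a dict of multiplicities, expanded back into the multiset of rows it counts
def expandL (l : List (List Int × Nat)) : List (List Int) :=
  l.flatMap (fun p => List.replicate p.2 p.1)

def E (d : PySem.Dict (List Int) Nat) : Multiset (List Int) := (expandL d.items : Multiset (List Int))

theorem expandL_cons (a : List Int × Nat) (l : List (List Int × Nat)) :
    expandL (a :: l) = List.replicate a.2 a.1 ++ expandL l := by
  simp [expandL]

theorem expandL_append (l1 l2 : List (List Int × Nat)) :
    expandL (l1 ++ l2) = expandL l1 ++ expandL l2 := by
  simp [expandL]

theorem length_expandL (l : List (List Int × Nat)) :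
    (expandL l).length = (l.map (·.2)).sum := by
  induction l with
  | nil => simp [expandL]
  | cons a l ih => simp [expandL_cons, ih]

theorem countP_replicate_row (m : Nat) (x : List Int) (p : List Int → Bool) :
    (List.replicate m x).countP p = if p x then m else 0 := by
  induction m with
  | zero => simp
  | succ m ih => by_cases h : p x <;> simp [List.replicate_succ, ih, h]

-- overwriting the unique entry holding key c (present with value v) adds m copies of c
theorem expand_overwrite (c : List Int) (v m : Nat) :
    ∀ (l : List (List Int × Nat)), (l.map (fun p => p.1)).Nodup → (c, v) ∈ l →
    (expandL (l.map (fun p => if (p.1 == c) = true then (c, v + m) else p)) : Multiset (List Int))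
      = (expandL l : Multiset (List Int)) + Multiset.replicate m c := by
  intro l
  induction l with
  | nil => intro _ h; simp at h
  | cons a l ih =>
    intro hnd hmem
    have hnd1 : a.1 ∉ l.map (fun p => p.1) := (List.nodup_cons.mp (by simpa using hnd)).1
    have hnd2 : (l.map (fun p => p.1)).Nodup := (List.nodup_cons.mp (by simpa using hnd)).2
    by_cases hb : (a.1 == c) = true
    · have hac : a.1 = c := eq_of_beq hb
      have ha : a = (c, v) := by
        rcases List.mem_cons.mp hmem with h | h
        · exact h.symm
        · exact absurd (List.mem_map.mpr ⟨(c, v), h, hac.symm⟩) hnd1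
      have htail : l.map (fun p => if (p.1 == c) = true then (c, v + m) else p) = l := by
        calc l.map (fun p => if (p.1 == c) = true then (c, v + m) else p)
            = l.map id := List.map_congr_left (fun p hp => by
              have hne : p.1 ≠ c := fun hpc =>
                hnd1 (List.mem_map.mpr ⟨p, hp, by rw [hpc]; exact hac.symm⟩)
              simp [hne])
          _ = l := List.map_id _
      subst ha
      simp only [List.map_cons, hb, if_pos, htail, expandL_cons]
      rw [← Multiset.coe_add, ← Multiset.coe_add, Multiset.coe_replicate, Multiset.coe_replicate,
        Multiset.replicate_add]
      abel
    · have hmem' : (c, v) ∈ l := by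
        rcases List.mem_cons.mp hmem with h | h
        · exact absurd (by simp [← h]) hb
        · exact h
      simp only [List.map_cons, hb, if_neg, Bool.false_eq_true, not_false_iff, expandL_cons]
      rw [← Multiset.coe_add, ← Multiset.coe_add, ih hnd2 hmem']
      abel

theorem keys_eq_map_fst (d : PySem.Dict (List Int) Nat) :
    d.keys = d.items.map (fun p => p.1) := by
  simp only [PySem.Dict.keys]

-- 'new[c] = new.get(c, 0) + m' adds m copies of c to the counted multiset
theorem E_insert_add (d : PySem.Dict (List Int) Nat) (hd : d.keys.Nodup) (c : List Int) (m : Nat) :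
    E (d.insert c (d.getD c 0 + m)) = E d + Multiset.replicate m c := by
  by_cases h : d.contains c = true
  · have hs : (d.get? c).isSome := by rw [← PySem.Dict.contains_eq_isSome_get?]; exact h
    obtain ⟨v, hv⟩ := Option.isSome_iff_exists.mp hs
    have hm := PySem.Dict.mem_items_of_get?_eq_some d hv
    have hgd : d.getD c 0 = v := PySem.Dict.getD_of_mem_items d hm hd 0
    rw [E, hgd, PySem.Dict.items_insert_of_contains d _ h]
    exact expand_overwrite c v m d.items (keys_eq_map_fst d ▸ hd) hm
  · have h' : d.contains c = false := by simpa using h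
    rw [E, PySem.Dict.getD_of_not_contains d _ h', PySem.Dict.items_insert_of_not_contains d _ h',
      expandL_append]
    rw [E, ← Multiset.coe_add]
    congr 1
    simp [expandL, Multiset.coe_replicate]

-- the inner 'for c in kids' loop adds m copies of every kid
theorem E_foldl_kids (m : Nat) :
    ∀ (kids : List (List Int)) (nw : PySem.Dict (List Int) Nat), nw.keys.Nodup →
    E (kids.foldl (fun nw c => nw.insert c (nw.getD c 0 + m)) nw)
      = E nw + (↑(kids.flatMap (List.replicate m)) : Multiset (List Int)) := by
  intro kids
  induction kids with
  | nil => intro nw _; simp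
  | cons c kids ih =>
    intro nw hnd
    rw [List.foldl_cons, ih _ (PySem.Dict.nodup_keys_insert nw c _ hnd), E_insert_add nw hnd,
      List.flatMap_cons, ← Multiset.coe_add, Multiset.coe_replicate]
    abel

-- one generation of B, over an explicit item list: multiplicities expand to step1 images
theorem E_foldl_items :
    ∀ (ps : List (List Int × Nat)) (nw : PySem.Dict (List Int) Nat), nw.keys.Nodup →
    (ps.foldl
        (fun nw p =>
          let kids := childRows p.1
          if kids = [] then nw.insert p.1 (nw.getD p.1 0 + p.2)
          else kids.foldl (fun nw c => nw.insert c (nw.getD c 0 + p.2)) nw)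
        nw).keys.Nodup ∧
    E (ps.foldl
        (fun nw p =>
          let kids := childRows p.1
          if kids = [] then nw.insert p.1 (nw.getD p.1 0 + p.2)
          else kids.foldl (fun nw c => nw.insert c (nw.getD c 0 + p.2)) nw)
        nw)
      = E nw + (↑(ps.flatMap (fun p => (step1 p.1).flatMap (List.replicate p.2))) : Multiset (List Int)) := by
  intro ps
  induction ps with
  | nil => intro nw hnd; exact ⟨hnd, by simp⟩
  | cons p ps ih =>
    intro nw hnd
    rw [List.foldl_cons, List.flatMap_cons]
    by_cases h : childRows p.1 = []
    · have hstep : step1 p.1 = [p.1] := by simp [step1, h]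
      have hnd' := PySem.Dict.nodup_keys_insert nw p.1 (nw.getD p.1 0 + p.2) hnd
      obtain ⟨h1, h2⟩ := ih (nw.insert p.1 (nw.getD p.1 0 + p.2)) hnd'
      rw [if_pos h]
      refine ⟨h1, ?_⟩
      rw [h2, E_insert_add nw hnd, hstep]
      have : (([p.1] : List (List Int)).flatMap (List.replicate p.2)) = List.replicate p.2 p.1 := by
        simp
      rw [this, ← Multiset.coe_add, Multiset.coe_replicate]
      abel
    · have hstep : step1 p.1 = childRows p.1 := by simp [step1, h]
      have hnd' : ((childRows p.1).foldl (fun nw c => nw.insert c (nw.getD c 0 + p.2)) nw).keys.Nodup :=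
        PySem.Dict.nodup_keys_foldl_insert (childRows p.1) (fun nw c => nw.getD c 0 + p.2) nw hnd
      obtain ⟨h1, h2⟩ := ih _ hnd'
      rw [if_neg h]
      refine ⟨h1, ?_⟩
      rw [h2, E_foldl_kids p.2 (childRows p.1) nw hnd, hstep, ← Multiset.coe_add]
      abel

theorem E_empty : E PySem.Dict.empty = 0 := by
  have : (PySem.Dict.empty : PySem.Dict (List Int) Nat).items = [] := rfl
  simp [E, this, expandL]

theorem E_stepB (d : PySem.Dict (List Int) Nat) (hd : d.keys.Nodup) :
    (stepB d).keys.Nodup ∧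
    E (stepB d) = (↑(d.items.flatMap (fun p => (step1 p.1).flatMap (List.replicate p.2))) : Multiset (List Int)) := by
  obtain ⟨h1, h2⟩ := E_foldl_items d.items PySem.Dict.empty PySem.Dict.nodup_keys_empty
  exact ⟨h1, by rw [stepB, h2, E_empty, zero_add]⟩

theorem coe_flatMap_replicate_left (m : Nat) (x : List Int) (h : List Int → List (List Int)) :
    (↑((List.replicate m x).flatMap h) : Multiset (List Int)) = m • (↑(h x) : Multiset (List Int)) := by
  induction m with
  | zero => simp
  | succ m ih =>
    rw [List.replicate_succ, List.flatMap_cons, ← Multiset.coe_add, ih, succ_nsmul]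
    abel

theorem coe_flatMap_replicate_right (m : Nat) (ys : List (List Int)) :
    (↑(ys.flatMap (List.replicate m)) : Multiset (List Int)) = m • (↑ys : Multiset (List Int)) := by
  induction ys with
  | nil => simp
  | cons y ys ih =>
    rw [List.flatMap_cons, ← Multiset.coe_add, ih, ← Multiset.cons_coe, ← Multiset.singleton_add,
      smul_add, Multiset.nsmul_singleton, Multiset.coe_replicate]

-- m copies of a row expand to the same multiset as m copies of each of its step1 images
theorem flatMap_swap (l : List (List Int × Nat)) :
    (↑(l.flatMap (fun p => (step1 p.1).flatMap (List.replicate p.2))) : Multiset (List Int))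
      = (↑(l.flatMap (fun p => (List.replicate p.2 p.1).flatMap step1)) : Multiset (List Int)) := by
  induction l with
  | nil => simp
  | cons p l ih =>
    rw [List.flatMap_cons, List.flatMap_cons, ← Multiset.coe_add, ← Multiset.coe_add, ih,
      coe_flatMap_replicate_left, coe_flatMap_replicate_right]

-- A's generation (children then carried-over rows) is, as a multiset, step1 applied rowwise
theorem stepA_multiset (t : List (List Int)) :
    (↑(t.flatMap childRows ++ t.filter (fun r => decide (childRows r = []))) : Multiset (List Int))
      = (↑(t.flatMap step1) : Multiset (List Int)) := by
  induction t with
  | nil => simp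
  | cons r t ih =>
    have ih' : (↑(t.flatMap childRows) + ↑(t.filter (fun r => decide (childRows r = []))) : Multiset (List Int))
        = ↑(t.flatMap step1) := by rw [Multiset.coe_add]; exact ih
    rw [List.flatMap_cons, List.flatMap_cons, List.filter_cons]
    by_cases h : childRows r = []
    · have hstep : step1 r = [r] := by simp [step1, h]
      rw [hstep, h]
      simp only [decide_true, if_pos, List.nil_append, List.singleton_append]
      exact Multiset.coe_eq_coe.mpr
        (List.perm_middle.trans ((Multiset.coe_eq_coe.mp ih).cons r))
    · have hstep : step1 r = childRows r := by simp [step1, h]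
      rw [hstep]
      simp only [h, decide_false, Bool.false_eq_true, if_neg, not_false_iff]
      rw [List.append_assoc, ← Multiset.coe_add, ← Multiset.coe_add, ← Multiset.coe_add, ← ih']

theorem values_sum_eq (d : PySem.Dict (List Int) Nat) :
    d.values.sum = (expandL d.items).length := by
  rw [length_expandL]
  simp only [PySem.Dict.values]

theorem foldl_kcount_int (k : Int) (l : List (List Int)) :
    ∀ (n0 : Int),
    l.foldl (fun kc c => if c.contains k then kc else kc + 1) n0
      = n0 + (l.countP (fun c => !c.contains k) : Int) := by
  induction l with
  | nil => intro n0; simp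
  | cons c l ih =>
    intro n0
    rw [List.foldl_cons, List.countP_cons]
    by_cases h : c.contains k
    · rw [if_pos h, ih, h]
      simp
    · rw [if_neg h, ih]
      have h' : c.contains k = false := by simpa using h
      rw [h']
      push_cast
      simp
      ring

theorem foldl_kcount_nat (k : Int) (l : List (List Int × Nat)) :
    ∀ (n0 : Nat),
    l.foldl (fun kc p => if p.1.contains k then kc else kc + p.2) n0
      = n0 + (expandL l).countP (fun c => !c.contains k) := by
  induction l with
  | nil => intro n0; simp [expandL]
  | cons a l ih =>
    intro n0
    rw [List.foldl_cons, expandL_cons, List.countP_append, countP_replicate_row]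
    by_cases h : a.1.contains k
    · rw [if_pos h, ih, h]
      simp
    · rw [if_neg h, ih]
      have h' : a.1.contains k = false := by simpa using h
      rw [h']
      simp
      omega

theorem fGo_succ (k : Int) (fuel : Nat) (t : List (List Int)) :
    fGo k (fuel + 1) t =
      (let tp1 := t.foldl (fun tp r => tp ++ childRows r) []
       let tp := t.foldl (fun tp r => if childRows r = [] then tp ++ [r] else tp) tp1
       if tp.length = t.length then
         ((t.length : Int), tp.foldl (fun kc c => if c.contains k then kc else kc + 1) (0 : Int))
       else fGo k fuel tp) := rfl

theorem fAltGo_succ (k : Int) (fuel : Nat) (cnt : PySem.Dict (List Int) Nat) :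
    fAltGo k (fuel + 1) cnt =
      (let nw := stepB cnt
       let oldTotal := (cnt.values.sum : Nat)
       if nw.values.sum = oldTotal then
         ((oldTotal : Int),
           ((nw.items.foldl (fun kc p => if p.1.contains k then kc else kc + p.2) (0 : Nat) : Nat) : Int))
       else fAltGo k fuel nw) := rfl

-- the main loop invariant: the dict counts exactly the multiset of A's list of rows
theorem main_go (k : Int) :
    ∀ (fuel : Nat) (t : List (List Int)) (d : PySem.Dict (List Int) Nat),
    d.keys.Nodup → E d = (↑t : Multiset (List Int)) → fGo k fuel t = fAltGo k fuel d := by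
  intro fuel
  induction fuel with
  | zero => intro t d _ _; rfl
  | succ fuel ih =>
    intro t d hnd hE
    obtain ⟨hnd', hE'⟩ := E_stepB d hnd
    have htp : (t.foldl (fun tp r => if childRows r = [] then tp ++ [r] else tp)
          (t.foldl (fun tp r => tp ++ childRows r) []))
        = t.flatMap childRows ++ t.filter (fun r => decide (childRows r = [])) := by
      rw [PySem.List.foldl_append_eq_flatMap, List.nil_append,
        PySem.List.foldl_append_ite_eq_filter (fun r => childRows r = [])]
    have hEtp : E (stepB d)
        = (↑(t.flatMap childRows ++ t.filter (fun r => decide (childRows r = []))) : Multiset (List Int)) := by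
      rw [hE', flatMap_swap, stepA_multiset]
      have hlist : d.items.flatMap (fun p => (List.replicate p.2 p.1).flatMap step1)
          = (expandL d.items).flatMap step1 := by
        simp only [expandL]
        rw [List.flatMap_assoc]
      rw [hlist, ← Multiset.coe_bind, ← Multiset.coe_bind]
      have hEd : (↑(expandL d.items) : Multiset (List Int)) = ↑t := hE
      rw [hEd]
    have hperm_t : (expandL d.items).Perm t := Multiset.coe_eq_coe.mp hE
    have hperm_tp : (expandL (stepB d).items).Perm
        (t.flatMap childRows ++ t.filter (fun r => decide (childRows r = []))) :=
      Multiset.coe_eq_coe.mp hEtp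
    have hlen_t : d.values.sum = t.length := by rw [values_sum_eq]; exact hperm_t.length_eq
    have hlen_tp : (stepB d).values.sum
        = (t.flatMap childRows ++ t.filter (fun r => decide (childRows r = []))).length := by
      rw [values_sum_eq]; exact hperm_tp.length_eq
    rw [fGo_succ, fAltGo_succ]
    simp only [htp, hlen_t, hlen_tp]
    by_cases hc : (t.flatMap childRows ++ t.filter (fun r => decide (childRows r = []))).length = t.length
    · simp only [hc, if_pos]
      refine Prod.ext rfl ?_
      rw [foldl_kcount_int, foldl_kcount_nat, zero_add, zero_add, hperm_tp.countP_eq]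
    · simp only [hc, if_neg, not_false_iff]
      exact ih _ _ hnd' hEtp

-- ===== VERDICT (by name: the statement is the Claim_ definition above) =====
theorem f_spec : Claim_equal_f := by
  intro n k t _ hpre
  unfold Spec_f
  have ht : t = 0 := hpre
  subst ht
  rw [f, if_pos rfl, f_alt, if_pos rfl]
  apply main_go
  · exact PySem.Dict.nodup_keys_insert _ _ _ PySem.Dict.nodup_keys_empty
  · have hc : (PySem.Dict.empty : PySem.Dict (List Int) Nat).contains (PySem.List.pyRange 1 (n + 1) 1) = false := by
      simp [PySem.Dict.contains_empty]
    rw [E, PySem.Dict.items_insert_of_not_contains _ _ hc]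
    have : (PySem.Dict.empty : PySem.Dict (List Int) Nat).items = [] := rfl
    rw [this]
    simp [expandL]
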